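-- pv_equiv track=rewrite | github.com/HaitianLiu/Structure-of-Computer-Programs | cats/cats.py | sphinx_swap
-- ===== SOURCE A (Python) =====
-- def sphinx_swap(start, goal, limit):
--     """A diff function for autocorrect that determines how many letters
--     in START need to be substituted to create GOAL, then adds the difference in
--     their lengths.
--     """
--     # BEGIN PROBLEM 6
--     if start == goal:
--         return 0
--     elif len(start) == 0 or len(goal) == 0:
--         return len(start) or len(goal)
--     elif start[0] == goal[0]:
--         return 0+sphinx_swap(start[1:], goal[1:], limit)
--     else:
--         if limit >= 0:
--             return 1+sphinx_swap(start[1:], goal[1:], limit-1)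
--         else:
--             return 0
-- ===== SOURCE B (Python) =====
-- def sphinx_swap(start, goal, limit):
--     count = 0
--     for a, b in zip(start, goal):
--         if a != b:
--             if limit < 0:
--                 return count
--             count += 1
--             limit -= 1
--     return count + abs(len(start) - len(goal))
-- ===== Notes on version B (the rewrite author's own statement) =====
-- stated objective: faster
-- what changed: Replaced the character-by-character slicing recursion with a single iterative pass over zip(start, goal) that counts mismatches under the limit (returning the accumulated count on early bail-out) and adds the length difference in closed form instead of recursing through the longer tail.
import Mathlib
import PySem

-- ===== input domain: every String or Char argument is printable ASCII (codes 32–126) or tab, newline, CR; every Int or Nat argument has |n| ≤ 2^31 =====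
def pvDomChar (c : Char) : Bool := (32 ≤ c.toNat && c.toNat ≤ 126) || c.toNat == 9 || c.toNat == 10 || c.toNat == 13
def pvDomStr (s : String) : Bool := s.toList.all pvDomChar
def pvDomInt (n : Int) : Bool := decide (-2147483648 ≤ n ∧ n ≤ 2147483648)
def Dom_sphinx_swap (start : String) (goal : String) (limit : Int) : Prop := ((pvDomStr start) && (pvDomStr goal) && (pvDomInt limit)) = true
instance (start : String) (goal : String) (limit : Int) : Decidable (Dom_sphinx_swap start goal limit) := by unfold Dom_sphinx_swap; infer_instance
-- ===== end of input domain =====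

-- B replaces A's slicing recursion by one iterative pass over the zipped characters plus a
-- closed-form length-difference term (objective: simpler).

-- ===== PORT A =====
-- A's recursion, verbatim on the character lists (start[1:] = tail, start[0] = head).
def sphinxSwapRec : List Char → List Char → Int → Int
  | s, g, limit =>
    if s = g then 0
    else if s.length = 0 ∨ g.length = 0 then
      -- Python `len(start) or len(goal)`: len(start) if nonzero, else len(goal)
      (if s.length ≠ 0 then (s.length : Int) else (g.length : Int))
    else
      match s, g with
      | a :: s', b :: g' =>
        if a = b then 0 + sphinxSwapRec s' g' limit
        else if limit ≥ 0 then 1 + sphinxSwapRec s' g' (limit - 1)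
        else 0
      | _, _ => 0

def sphinx_swap (start : String) (goal : String) (limit : Int) : Int :=
  sphinxSwapRec start.toList goal.toList limit

-- ===== PORT B =====
-- B's for-loop over zip(start, goal): returns (count, earlyReturn?)
def sphinxAltLoop : List (Char × Char) → Int → Int → Int × Bool
  | [], _, count => (count, false)
  | (a, b) :: rest, limit, count =>
    if a ≠ b then
      if limit < 0 then (count, true)
      else sphinxAltLoop rest (limit - 1) (count + 1)
    else sphinxAltLoop rest limit count

def sphinx_swap_alt (start : String) (goal : String) (limit : Int) : Int :=
  let s := start.toList
  let g := goal.toList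
  let r := sphinxAltLoop (s.zip g) limit 0
  if r.2 then r.1
  else r.1 + (((s.length : Int) - (g.length : Int)).natAbs : Int)

-- ===== PRECONDITION & SPEC =====
def Spec_sphinx_swap (start : String) (goal : String) (limit : Int) (out : Int) : Prop := out = sphinx_swap_alt start goal limit
instance (start : String) (goal : String) (limit : Int) (out : Int) : Decidable (Spec_sphinx_swap start goal limit out) := by unfold Spec_sphinx_swap; infer_instance

-- ===== CLAIM (what is proved, stated in full; the proofs are below) =====
def Claim_equal_sphinx_swap : Prop := ∀ (start : String) (goal : String) (limit : Int), Dom_sphinx_swap start goal limit → Spec_sphinx_swap start goal limit (sphinx_swap start goal limit)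

-- ===== LEMMAS AND PROOFS =====

theorem sphinxSwap_loop_eq : ∀ (s g : List Char) (limit count : Int),
    (if (sphinxAltLoop (s.zip g) limit count).2 then (sphinxAltLoop (s.zip g) limit count).1
     else (sphinxAltLoop (s.zip g) limit count).1 + (((s.length : Int) - (g.length : Int)).natAbs : Int))
      = count + sphinxSwapRec s g limit := by
  intro s
  induction s with
  | nil =>
    intro g limit count
    cases g with
    | nil => simp [sphinxAltLoop, sphinxSwapRec]
    | cons b g' =>
      have hA : sphinxSwapRec [] (b :: g') limit = ((b :: g').length : Int) := by
        simp [sphinxSwapRec]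
      simp only [List.zip_nil_left, sphinxAltLoop, Bool.false_eq_true, ite_false, hA,
        List.length_nil, List.length_cons]
      omega
  | cons a s' ih =>
    intro g limit count
    cases g with
    | nil =>
      have hA : sphinxSwapRec (a :: s') [] limit = ((a :: s').length : Int) := by
        simp [sphinxSwapRec]
      simp only [List.zip_nil_right, sphinxAltLoop, Bool.false_eq_true, ite_false, hA,
        List.length_nil, List.length_cons]
      omega
    | cons b g' =>
      rw [List.zip_cons_cons]
      by_cases hab : a = b
      · subst hab
        have hA : sphinxSwapRec (a :: s') (a :: g') limit = sphinxSwapRec s' g' limit := by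
          by_cases hsg : s' = g'
          · subst hsg
            rw [show sphinxSwapRec s' s' limit = 0 by cases s' <;> simp [sphinxSwapRec]]
            simp [sphinxSwapRec]
          · simp [sphinxSwapRec, hsg]
        rw [hA]
        have hIH := ih g' limit count
        simp only [sphinxAltLoop, ne_eq, not_true_eq_false, ite_false, List.length_cons]
        cases hb : (sphinxAltLoop (s'.zip g') limit count).2 <;>
          simp only [hb, if_true, if_false, Bool.false_eq_true] at hIH ⊢ <;>
          omega
      · have hsg : (a :: s') ≠ (b :: g') := by simp [hab]
        by_cases hl : limit < 0
        · have hA : sphinxSwapRec (a :: s') (b :: g') limit = 0 := by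
            simp [sphinxSwapRec, hsg, hab]; omega
          simp [sphinxAltLoop, hab, hl, hA]
        · have hA : sphinxSwapRec (a :: s') (b :: g') limit = 1 + sphinxSwapRec s' g' (limit - 1) := by
            simp [sphinxSwapRec, hsg, hab, show limit ≥ 0 from by omega]
          rw [hA]
          have hIH := ih g' (limit - 1) (count + 1)
          simp only [sphinxAltLoop, ne_eq, hab, not_false_eq_true, if_true, if_neg hl,
            List.length_cons]
          cases hb : (sphinxAltLoop (s'.zip g') (limit - 1) (count + 1)).2 <;>
            simp only [hb, Bool.false_eq_true, ite_false, ite_true] at hIH ⊢ <;>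
            omega

-- ===== VERDICT (by name: the statement is the Claim_ definition above) =====
theorem sphinx_swap_spec : Claim_equal_sphinx_swap := by
  intro start goal limit _
  unfold Spec_sphinx_swap sphinx_swap sphinx_swap_alt
  simp only
  rw [sphinxSwap_loop_eq]
  ring
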